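-- pv_equiv track=rewrite | github.com/ShashankSinha98/Competitive-Programming | 6. Maths-III Solving Linear Recurrences/SEQ_SPOJ_2020.py | transformation_matrix
-- ===== SOURCE A (Python) =====
-- def transformation_matrix(k,c):
--
--     T = [[0]*(k) for i in range(k)]
--
--     for i in range(k):
--         for j in range(k):
--             if i<k-1:
--                 if i+1 == j:
--                     T[i][j] = 1
--                 else:
--                     T[i][j] = 0
--
--             else:
--                 T[i][j] = c[k-j-1]
--
--     return T
-- ===== SOURCE B (Python) =====
-- def transformation_matrix(k, c):
--     if k <= 0:
--         return []
--     rows = []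
--     row = [0, 1] + [0] * (k - 2)        # e_1: the first companion row
--     for _ in range(k - 1):
--         rows.append(row)
--         row = [0] + row[:-1]            # shift register: move the 1 one column right
--     rows.append(list(reversed(c[:k])))  # last row: the coefficients reversed
--     return rows
-- ===== Notes on version B (the rewrite author's own statement) =====
-- stated objective: alternative
-- what changed: B is a shift-register construction: it keeps one current row, emits it and derives the next row by shifting it right ([0] + row[:-1]), so the unit rows are produced by data flow from row to row with no index arithmetic or per-cell branching, then appends the reversed coefficient prefix as the last row; A instead fills every cell of a k x k zero matrix with a nested per-cell loop and branches.
import Mathlib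
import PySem

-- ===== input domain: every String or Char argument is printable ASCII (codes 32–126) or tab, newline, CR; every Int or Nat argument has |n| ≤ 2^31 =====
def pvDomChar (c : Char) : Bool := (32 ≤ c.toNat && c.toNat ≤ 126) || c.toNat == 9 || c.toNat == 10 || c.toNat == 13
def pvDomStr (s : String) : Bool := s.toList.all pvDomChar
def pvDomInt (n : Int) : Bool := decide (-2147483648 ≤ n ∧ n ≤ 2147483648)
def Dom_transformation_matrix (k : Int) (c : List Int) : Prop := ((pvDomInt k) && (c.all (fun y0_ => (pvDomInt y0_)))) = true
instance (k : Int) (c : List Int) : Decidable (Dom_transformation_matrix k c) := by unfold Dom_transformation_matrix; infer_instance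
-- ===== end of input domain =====

-- B replaces A's per-cell nested loop with a shift-register construction: one current row is kept,
-- emitted, and shifted right each step, then the reversed coefficient prefix is the last row.

-- ===== PORT A =====
-- A fills a zero matrix cell by cell, overwriting EVERY cell exactly once (each (i,j) is assigned in
-- some branch), so the port computes each cell of row i, column j directly over the same two ranges.
-- c[k-j-1] has a nonnegative index here; pyGetD is exact under Pre_ (k ≤ len c), which rules out the
-- IndexError A raises when len c < k.
def transformation_matrix (k : Int) (c : List Int) : List (List Int) :=
  (PySem.List.pyRange 0 k 1).map (fun i =>
    (PySem.List.pyRange 0 k 1).map (fun j =>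
      if i < k - 1 then (if i + 1 = j then 1 else 0)
      else PySem.List.pyGetD c (k - j - 1) 0))

-- ===== PORT B =====
-- Transliteration of Source B: early return for k ≤ 0; state (rows, row) starting from ([], e_1 with
-- e_1 = [0,1] + [0]*(k-2)); each of the k-1 iterations appends row and shifts it right
-- (row = [0] + row[:-1], the slice row[:-1] ported as PySem slice); finally list(reversed(c[:k])).
def transformation_matrix_alt (k : Int) (c : List Int) : List (List Int) :=
  if k ≤ 0 then []
  else
    let p := (PySem.List.pyRange 0 (k - 1) 1).foldl
      (fun (st : List (List Int) × List Int) _ =>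
        (st.1 ++ [st.2], 0 :: PySem.List.slice st.2 none (some (-1))))
      (([] : List (List Int)), [0, 1] ++ List.replicate (k - 2).toNat 0)
    p.1 ++ [(PySem.List.slice c none (some k)).reverse]

-- ===== PRECONDITION & SPEC =====
-- Pre_ excludes exactly the inputs where A raises IndexError: 1 ≤ k with fewer than k coefficients.
def Pre_transformation_matrix (k : Int) (c : List Int) : Prop := k ≤ 0 ∨ k ≤ (c.length : Int)
instance (k : Int) (c : List Int) : Decidable (Pre_transformation_matrix k c) := by unfold Pre_transformation_matrix; infer_instance
def pvWitness_transformation_matrix : Int × List Int := (2, [3, 4])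

def Spec_transformation_matrix (k : Int) (c : List Int) (out : List (List Int)) : Prop := out = transformation_matrix_alt k c
instance (k : Int) (c : List Int) (out : List (List Int)) : Decidable (Spec_transformation_matrix k c out) := by unfold Spec_transformation_matrix; infer_instance

-- ===== CLAIM (what is proved, stated in full; the proofs are below) =====
def Claim_equal_transformation_matrix : Prop := ∀ (k : Int) (c : List Int), Dom_transformation_matrix k c → Pre_transformation_matrix k c → Spec_transformation_matrix k c (transformation_matrix k c)

-- ===== LEMMAS AND PROOFS =====

-- the unit row with a 1 at column j (all zero when n ≤ j)
def pvUnit (n j : Nat) : List Int := (List.replicate n (0 : Int)).set j 1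

-- shifting a unit row right moves the 1 one column to the right (the 1 falls off at the end)
theorem pv_shift_unit (n j : Nat) (hn : 1 ≤ n) :
    (0 : Int) :: (pvUnit n j).dropLast = pvUnit n (j + 1) := by
  apply List.ext_getElem
  · simp [pvUnit]; omega
  · intro t ht ht'
    match t with
    | 0 =>
      simp [pvUnit, List.getElem_replicate]
    | t + 1 =>
      have htn : t + 1 < n := by simpa [pvUnit] using ht'
      have hdl : t < ((pvUnit n j).dropLast).length := by simp [pvUnit]; omega
      simp only [List.getElem_cons_succ]
      rw [List.getElem_dropLast]
      simp only [pvUnit, List.getElem_set, List.getElem_replicate]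
      by_cases hj : j = t
      · simp [hj]
      · simp [hj]

-- the shift-register fold: starting from any unit row it emits the successive unit rows
theorem pv_fold_units (n : Nat) (hn : 1 ≤ n) (l : List Int) :
    ∀ (acc : List (List Int)) (j : Nat),
    l.foldl (fun (st : List (List Int) × List Int) _ =>
        (st.1 ++ [st.2], 0 :: st.2.dropLast)) (acc, pvUnit n j)
      = (acc ++ (List.range l.length).map (fun t => pvUnit n (j + t)), pvUnit n (j + l.length)) := by
  induction l with
  | nil => intro acc j; simp
  | cons x l ih =>
    intro acc j
    simp only [List.foldl_cons]
    rw [pv_shift_unit n j hn, ih (acc ++ [pvUnit n j]) (j + 1), Prod.mk.injEq]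
    refine ⟨?_, ?_⟩
    · rw [List.append_assoc, List.length_cons, List.range_succ_eq_map, List.map_cons]
      simp only [Nat.add_zero, List.map_map, List.singleton_append]
      congr 1
      congr 1
      apply List.map_congr_left
      intro t _
      simp only [Function.comp_apply]
      congr 1
      omega
    · congr 1
      simp; omega

-- a unit row equals A's 0/1 comprehension over range n
theorem pv_unitRow (n i : Nat) :
    (List.range n).map (fun j : Nat => if ((i : Int) + 1 = (j : Int)) then (1 : Int) else 0)
      = pvUnit n (i + 1) := by
  apply List.ext_getElem
  · simp [pvUnit]
  · intro j hj hj'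
    simp only [pvUnit, List.getElem_map, List.getElem_range, List.getElem_set, List.getElem_replicate]
    by_cases hji : j = i + 1
    · subst hji; simp
    · have hne : ¬ ((i : Int) + 1 = (j : Int)) := by intro hc; apply hji; omega
      have hne' : ¬ (i + 1 = j) := by omega
      simp [hne, hne']

-- the last row: the c[k-j-1] comprehension equals the reversed prefix of c
theorem pv_lastRow (k : Int) (c : List Int) (hk : 0 < k) (hlen : k ≤ (c.length : Int)) :
    (List.range k.toNat).map (fun j : Nat => PySem.List.pyGetD c (k - (j : Int) - 1) 0)
      = (c.take k.toNat).reverse := by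
  apply List.ext_getElem
  · simp; omega
  · intro j hj hj'
    have hjk : j < k.toNat := by simpa using hj
    have h1 : (0 : Int) ≤ k - (j : Int) - 1 := by omega
    have h2 : k - (j : Int) - 1 < (c.length : Int) := by omega
    rw [List.getElem_map, List.getElem_range,
        PySem.List.pyGetD_eq_getElem (xs := c) (d := 0) h1 h2,
        List.getElem_reverse, List.getElem_take]
    congr 1
    have : (c.take k.toNat).length = k.toNat := by simp; omega
    omega

-- B's initial row is the first unit row (when k ≥ 2; for k = 1 the loop never runs)
theorem pv_row0 (k : Int) (hk : 2 ≤ k) :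
    ([0, 1] ++ List.replicate (k - 2).toNat (0 : Int)) = pvUnit k.toNat 1 := by
  apply List.ext_getElem
  · simp [pvUnit]; omega
  · intro t ht ht'
    simp only [pvUnit, List.getElem_set, List.getElem_replicate]
    match t with
    | 0 => simp
    | 1 => simp
    | t + 2 =>
      simp [List.getElem_replicate]

theorem transformation_matrix_eq_alt (k : Int) (c : List Int)
    (hpre : Pre_transformation_matrix k c) :
    transformation_matrix k c = transformation_matrix_alt k c := by
  by_cases hk : k ≤ 0
  · simp [transformation_matrix, transformation_matrix_alt,
      PySem.List.pyRange_one_eq_nil hk, hk]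
  · have hlen : k ≤ (c.length : Int) := by rcases hpre with h | h <;> omega
    have hkpos : 0 < k := by omega
    set n := k.toNat with hn
    have hnk : (n : Int) = k := Int.toNat_of_nonneg (by omega)
    have hn1 : 1 ≤ n := by omega
    have hrangek : PySem.List.pyRange 0 k 1 = (List.range n).map (fun t : Nat => (t : Int)) := by
      have h0 : (k - 0).toNat = n := by omega
      rw [PySem.List.pyRange_one, h0]
      simp
    -- B's fold produces exactly the unit rows pvUnit n 1, …, pvUnit n (n-1)
    have hfold : transformation_matrix_alt k c
        = ((List.range (n - 1)).map (fun t => pvUnit n (1 + t)))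
          ++ [(c.take n).reverse] := by
      unfold transformation_matrix_alt
      rw [if_neg hk, PySem.List.slice_to c (by omega : (0 : Int) ≤ k)]
      simp only [PySem.List.slice_to_neg_one]
      by_cases h2 : 2 ≤ k
      · rw [pv_row0 k h2, ← hn,
          pv_fold_units n hn1 (PySem.List.pyRange 0 (k - 1) 1) [] 1]
        have : (PySem.List.pyRange 0 (k - 1) 1).length = n - 1 := by
          rw [PySem.List.length_pyRange_one]; omega
        simp [this]
      · have hk1 : k = 1 := by omega
        subst hk1
        have hne : n = 1 := by omega
        rw [hne]
        simp [PySem.List.pyRange_one_eq_nil]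
    rw [hfold]
    apply List.ext_getElem
    · simp [transformation_matrix, hrangek]; omega
    · intro i hi hi'
      have hin : i < n := by
        simpa [transformation_matrix, hrangek] using hi
      simp only [transformation_matrix, hrangek, List.map_map, List.getElem_map,
        List.getElem_range, Function.comp_apply]
      by_cases hi1 : i < n - 1
      · -- a unit row
        have hcond : ((i : Nat) : Int) < k - 1 := by omega
        rw [List.getElem_append_left (by simpa using hi1)]
        simp only [List.getElem_map, List.getElem_range, if_pos hcond]
        have hcomp : ((fun j : Int => if (i : Int) + 1 = j then (1 : Int) else 0)
            ∘ fun t : Nat => (t : Int))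
            = (fun j : Nat => if ((i : Int) + 1 = (j : Int)) then (1 : Int) else 0) := by
          funext t; rfl
        rw [hcomp, pv_unitRow n i]
        congr 1
        omega
      · -- the last row
        have hieq : i = n - 1 := by omega
        have hge : ((List.range (n - 1)).map (fun t => pvUnit n (1 + t))).length ≤ i := by
          simp [hieq]
        have hcond : ¬ (((i : Nat) : Int) < k - 1) := by omega
        rw [List.getElem_append_right hge, List.getElem_singleton]
        simp only [if_neg hcond]
        rw [← pv_lastRow k c hkpos hlen, ← hn]
        simp [Function.comp_def]

-- ===== VERDICT (by name: the statement is the Claim_ definition above) =====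
theorem transformation_matrix_spec : Claim_equal_transformation_matrix := by
  intro k c _ hpre
  unfold Spec_transformation_matrix
  exact transformation_matrix_eq_alt k c hpre
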